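-- pv_equiv track=rewrite | github.com/syslog-ng/syslog-ng | contrib/config_option_database/utils/OptionParser.py | _find_options_wo_keyword
-- ===== SOURCE A (Python) =====
-- def _find_options_wo_keyword(path):
--     options = set()
--     left_brace = None
--     for index, token in enumerate(path):
--         if token == "'('":
--             if left_brace is None:
--                 left_brace = index
--                 continue
--             option_start = left_brace + 1
--             option_end = index - 2
--             if option_start <= option_end:
--                 options.add((option_start, option_end))
--             left_brace = index
--         elif token == "')'":
--             left_brace = None
--     return options
-- ===== SOURCE B (Python) =====
-- def _find_options_wo_keyword(path):
--     # Pass 1: group global indices of "'('" tokens; a ")'" token ends the current group.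
--     groups = []
--     cur = []
--     for index, token in enumerate(path):
--         if token == "'('":
--             cur.append(index)
--         elif token == "')'":
--             if cur:
--                 groups.append(cur)
--             cur = []
--     if cur:
--         groups.append(cur)
--     # Pass 2: adjacent '(' positions within a group delimit an option range.
--     options = set()
--     for g in groups:
--         for prev, nxt in zip(g, g[1:]):
--             start, end = prev + 1, nxt - 2
--             if start <= end:
--                 options.add((start, end))
--     return options
-- ===== Notes on version B (the rewrite author's own statement) =====
-- stated objective: alternative
-- what changed: Replaces the single stateful scan carrying a last-left-brace variable by two passes: first group the '(' token indices into runs separated by ')', then derive the ranges from adjacent index pairs within each group.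
import Mathlib
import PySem

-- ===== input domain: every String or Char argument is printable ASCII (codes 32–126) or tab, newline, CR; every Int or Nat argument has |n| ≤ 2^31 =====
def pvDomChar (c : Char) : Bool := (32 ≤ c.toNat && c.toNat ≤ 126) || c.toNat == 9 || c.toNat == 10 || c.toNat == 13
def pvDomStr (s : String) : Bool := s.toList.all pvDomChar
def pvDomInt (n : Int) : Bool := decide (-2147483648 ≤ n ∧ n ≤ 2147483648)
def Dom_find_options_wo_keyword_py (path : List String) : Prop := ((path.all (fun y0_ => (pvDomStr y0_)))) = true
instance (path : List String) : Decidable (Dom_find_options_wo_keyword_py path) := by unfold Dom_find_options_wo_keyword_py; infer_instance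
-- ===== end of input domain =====

-- B replaces A's single stateful scan (a last-left-brace variable) by two passes: group '(' indices
-- into runs separated by ')', then derive ranges from adjacent pairs within each group (alternative).

-- ===== PORT A =====
def find_options_wo_keyword_py (path : List String) : List (Int × Int) :=
  ((PySem.List.enumerate path).foldl
    (fun (st : PySem.Set (Int × Int) × Option Int) (it : Int × String) =>
      let options := st.1
      let left_brace := st.2
      if it.2 = "'('" then
        match left_brace with
        | none => (options, some it.1)
        | some lb =>
          let option_start := lb + 1
          let option_end := it.1 - 2
          ((if option_start ≤ option_end then options.add (option_start, option_end) else options),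
           some it.1)
      else if it.2 = "')'" then (options, none)
      else st)
    (PySem.Set.ofList [], none)).1

-- ===== PORT B =====
def find_options_wo_keyword_py_alt (path : List String) : List (Int × Int) :=
  -- pass 1: group the '(' indices into runs separated by ')'
  let gs := (PySem.List.enumerate path).foldl
    (fun (st : List (List Int) × List Int) (it : Int × String) =>
      if it.2 = "'('" then (st.1, st.2 ++ [it.1])
      else if it.2 = "')'" then (if st.2 = [] then st.1 else st.1 ++ [st.2], [])
      else st)
    ([], [])
  let groups := if gs.2 = [] then gs.1 else gs.1 ++ [gs.2]
  -- pass 2: adjacent pairs within each group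
  groups.foldl
    (fun acc g =>
      (g.zip g.tail).foldl
        (fun (acc : PySem.Set (Int × Int)) (p : Int × Int) =>
          if p.1 + 1 ≤ p.2 - 2 then acc.add (p.1 + 1, p.2 - 2) else acc)
        acc)
    (PySem.Set.ofList [])

-- ===== PRECONDITION & SPEC =====
def Spec_find_options_wo_keyword_py (path : List String) (out : List (Int × Int)) : Prop := out = find_options_wo_keyword_py_alt path
instance (path : List String) (out : List (Int × Int)) : Decidable (Spec_find_options_wo_keyword_py path out) := by unfold Spec_find_options_wo_keyword_py; infer_instance

-- ===== CLAIM (what is proved, stated in full; the proofs are below) =====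
def Claim_equal_find_options_wo_keyword_py : Prop := ∀ (path : List String), Dom_find_options_wo_keyword_py path → Spec_find_options_wo_keyword_py path (find_options_wo_keyword_py path)

-- ===== LEMMAS AND PROOFS =====

/-- the range-emitting fold over one group's adjacent pairs (pass 2 inner loop of B). -/
def pvEmit (acc : PySem.Set (Int × Int)) (g : List Int) : PySem.Set (Int × Int) :=
  (g.zip g.tail).foldl
    (fun (acc : PySem.Set (Int × Int)) (p : Int × Int) =>
      if p.1 + 1 ≤ p.2 - 2 then acc.add (p.1 + 1, p.2 - 2) else acc)
    acc

/-- ranges accumulated from finished groups plus the current run. -/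
def pvEmitAll (groups : List (List Int)) (cur : List Int) : PySem.Set (Int × Int) :=
  pvEmit (groups.foldl pvEmit (PySem.Set.ofList [])) cur

lemma pvZipTail_append (g : List Int) (i : Int) :
    (g ++ [i]).zip (g ++ [i]).tail =
      g.zip g.tail ++ (match g.getLast? with | none => [] | some lb => [(lb, i)]) := by
  induction g with
  | nil => simp
  | cons a g ih =>
    cases g with
    | nil => simp
    | cons b g =>
      simp only [List.cons_append, List.tail_cons, List.zip_cons_cons] at *
      rw [ih]
      simp [List.getLast?_cons_cons]

lemma pvEmit_append_last (acc : PySem.Set (Int × Int)) (g : List Int) (i : Int) :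
    pvEmit acc (g ++ [i]) =
      (match g.getLast? with
       | none => pvEmit acc g
       | some lb => if lb + 1 ≤ i - 2 then (pvEmit acc g).add (lb + 1, i - 2) else pvEmit acc g) := by
  unfold pvEmit
  rw [pvZipTail_append, List.foldl_append]
  cases g.getLast? with
  | none => simp
  | some lb => simp

lemma pvEmit_nil (acc : PySem.Set (Int × Int)) : pvEmit acc [] = acc := rfl

lemma pvEmitAll_close (groups : List (List Int)) (cur : List Int) :
    pvEmitAll groups cur = pvEmitAll (groups ++ [cur]) [] := by
  unfold pvEmitAll
  rw [List.foldl_append]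
  simp [pvEmit_nil]

/-- loop invariant: A's fold state is determined by B's grouping fold state. -/
lemma pvLoop (l : List (Int × String)) (groups : List (List Int)) (cur : List Int) :
    l.foldl
      (fun (st : PySem.Set (Int × Int) × Option Int) (it : Int × String) =>
        let options := st.1
        let left_brace := st.2
        if it.2 = "'('" then
          match left_brace with
          | none => (options, some it.1)
          | some lb =>
            let option_start := lb + 1
            let option_end := it.1 - 2
            ((if option_start ≤ option_end then options.add (option_start, option_end) else options),
             some it.1)
        else if it.2 = "')'" then (options, none)
        else st)
      (pvEmitAll groups cur, cur.getLast?)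
    =
    (fun (st : List (List Int) × List Int) => (pvEmitAll st.1 st.2, st.2.getLast?))
      (l.foldl
        (fun (st : List (List Int) × List Int) (it : Int × String) =>
          if it.2 = "'('" then (st.1, st.2 ++ [it.1])
          else if it.2 = "')'" then (if st.2 = [] then st.1 else st.1 ++ [st.2], [])
          else st)
        (groups, cur)) := by
  induction l generalizing groups cur with
  | nil => rfl
  | cons it l ih =>
    simp only [List.foldl_cons]
    by_cases hop : it.2 = "'('"
    · simp only [hop, if_true]
      have hlast : (cur ++ [it.1]).getLast? = some it.1 := by
        simp [List.getLast?_append]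
      cases hcur : cur.getLast? with
      | none =>
        have hc : cur = [] := by
          cases cur with
          | nil => rfl
          | cons a t => simp [List.getLast?_cons] at hcur
        subst hc
        exact ih groups [it.1]
      | some lb =>
        have key := ih groups (cur ++ [it.1])
        rw [show pvEmitAll groups (cur ++ [it.1]) =
              (if lb + 1 ≤ it.1 - 2 then (pvEmitAll groups cur).add (lb + 1, it.1 - 2)
               else pvEmitAll groups cur) from by
            unfold pvEmitAll; rw [pvEmit_append_last, hcur], hlast] at key
        exact key
    · by_cases hcl : it.2 = "')'"
      · simp only [hcl, if_true]
        by_cases hc : cur = []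
        · subst hc
          simpa using ih groups []
        · simp only [hc, ite_false]
          have : pvEmitAll groups cur = pvEmitAll (groups ++ [cur]) [] :=
            pvEmitAll_close groups cur
          rw [this]
          simpa using ih (groups ++ [cur]) []
      · simp only [hop, hcl, ite_false]
        exact ih groups cur

-- ===== VERDICT (by name: the statement is the Claim_ definition above) =====
theorem find_options_wo_keyword_py_spec : Claim_equal_find_options_wo_keyword_py := by
  intro path _
  unfold Spec_find_options_wo_keyword_py find_options_wo_keyword_py find_options_wo_keyword_py_alt
  have h := pvLoop (PySem.List.enumerate path) [] []
  refine Eq.trans (congrArg Prod.fst h) ?_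
  generalize (List.foldl
      (fun (st : List (List Int) × List Int) (it : Int × String) =>
        if it.2 = "'('" then (st.1, st.2 ++ [it.1])
        else if it.2 = "')'" then (if st.2 = [] then st.1 else st.1 ++ [st.2], [])
        else st)
      ([], []) (PySem.List.enumerate path)) = G
  show pvEmitAll G.1 G.2 =
    List.foldl
      (fun acc g =>
        (g.zip g.tail).foldl
          (fun (acc : PySem.Set (Int × Int)) (p : Int × Int) =>
            if p.1 + 1 ≤ p.2 - 2 then acc.add (p.1 + 1, p.2 - 2) else acc)
          acc)
      (PySem.Set.ofList []) (if G.2 = [] then G.1 else G.1 ++ [G.2])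
  by_cases hc : G.2 = []
  · rw [hc, if_pos rfl]
    rfl
  · rw [if_neg hc, pvEmitAll_close G.1 G.2]
    rfl
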